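-- pv_equiv track=rewrite | github.com/SNUPEL/2024_JSSP_GA | GAS/Crossover/SXX.py | legalize
-- ===== SOURCE A (Python) =====
-- def legalize(proto, original_seq):
--     """
--     Adjusts the proto-offspring to ensure valid sequences by removing excess genes
--     and adding missing genes.
--
--     Parameters:
--         proto (list): The proto-offspring sequence.
--         original_seq (list): The original parent sequence.
--
--     Returns:
--         list: The legalized offspring sequence.
--     """
--     gene_count = {gene: original_seq.count(gene) for gene in original_seq}
--     proto_count = {gene: proto.count(gene) for gene in proto}
--
--     missing_genes = [gene for gene, count in gene_count.items() if proto_count.get(gene, 0) < count]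
--     excess_genes = [gene for gene, count in proto_count.items() if count > gene_count.get(gene, 0)]
--
--     for i, gene in enumerate(proto):
--         if proto_count[gene] > gene_count[gene]:
--             proto_count[gene] -= 1
--             if missing_genes:
--                 proto[i] = missing_genes.pop(0)
--
--     return proto
-- ===== SOURCE B (Python) =====
-- def legalize(proto, original_seq):
--     """Legalize offspring: single-pass counting, then collect excess slots and fill them from missing genes."""
--     gene_count = {}
--     for g in original_seq:
--         gene_count[g] = gene_count.get(g, 0) + 1
--     proto_count = {}
--     for g in proto:
--         proto_count[g] = proto_count.get(g, 0) + 1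
--     missing_genes = [g for g, c in gene_count.items() if proto_count.get(g, 0) < c]
--     remaining = dict(proto_count)
--     slots = []
--     for i, g in enumerate(proto):
--         if remaining[g] > gene_count[g]:
--             remaining[g] = remaining[g] - 1
--             slots.append(i)
--     for i, g in zip(slots, missing_genes):
--         proto[i] = g
--     return proto
-- ===== Notes on version B (the rewrite author's own statement) =====
-- stated objective: faster
-- what changed: B replaces A's quadratic .count()-per-element dict comprehensions by single-pass incremental counting, and replaces A's assign-while-scanning mutation loop by first collecting the excess indices into a slots list and then zipping slots with missing_genes to do the assignments.
import Mathlib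
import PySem

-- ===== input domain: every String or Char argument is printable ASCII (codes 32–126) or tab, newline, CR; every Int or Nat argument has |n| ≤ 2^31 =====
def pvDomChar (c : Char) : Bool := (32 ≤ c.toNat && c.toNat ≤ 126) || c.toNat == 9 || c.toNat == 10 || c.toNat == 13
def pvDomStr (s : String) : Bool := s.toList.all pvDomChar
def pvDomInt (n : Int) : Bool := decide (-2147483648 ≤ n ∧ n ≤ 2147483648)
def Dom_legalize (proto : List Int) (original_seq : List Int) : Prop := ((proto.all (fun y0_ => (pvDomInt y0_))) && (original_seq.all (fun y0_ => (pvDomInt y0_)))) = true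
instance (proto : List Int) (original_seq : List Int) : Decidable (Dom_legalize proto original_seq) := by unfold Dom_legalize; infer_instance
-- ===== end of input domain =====

-- B replaces A's quadratic .count-comprehensions by single-pass counting and A's mutating loop by
-- collecting excess indices then zipping them with the missing genes (faster counting, same result).
-- A mutates `proto` in place and returns it; B performs the same in-place mutation in Python.

-- ===== PORT A =====
def legalize (proto : List Int) (original_seq : List Int) : List Int :=
  let gene_count : PySem.Dict Int Int :=
    original_seq.foldl (fun d g => d.insert g ((original_seq.count g : Int))) PySem.Dict.empty
  let proto_count : PySem.Dict Int Int :=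
    proto.foldl (fun d g => d.insert g ((proto.count g : Int))) PySem.Dict.empty
  let missing_genes : List Int :=
    (gene_count.items.filter (fun p => decide (proto_count.getD p.1 0 < p.2))).map (fun p => p.1)
  let _excess_genes : List Int :=
    (proto_count.items.filter (fun p => decide (p.2 > gene_count.getD p.1 0))).map (fun p => p.1)
  -- for i, gene in enumerate(proto): proto[i] = … only rewrites the current index, so folding over the
  -- original enumeration is exact; gene_count[gene] raises KeyError outside Pre_legalize (getD 0 there).
  ((PySem.List.enumerate proto).foldl
      (fun st p =>
        if st.2.1.getD p.2 0 > gene_count.getD p.2 0 then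
          match st.2.2 with
          | [] => (st.1, st.2.1.insert p.2 (st.2.1.getD p.2 0 - 1), ([] : List Int))
          | m :: ms => (st.1.set p.1.toNat m, st.2.1.insert p.2 (st.2.1.getD p.2 0 - 1), ms)
        else st)
      (proto, proto_count, missing_genes)).1

-- ===== PORT B =====
-- d[g] = d.get(g, 0) + 1 over xs
def pvCounts (xs : List Int) : PySem.Dict Int Int :=
  xs.foldl (fun d g => d.insert g (d.getD g 0 + 1)) PySem.Dict.empty

def legalize_alt (proto : List Int) (original_seq : List Int) : List Int :=
  let gene_count := pvCounts original_seq
  let proto_count := pvCounts proto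
  let missing_genes : List Int :=
    (gene_count.items.filter (fun p => decide (proto_count.getD p.1 0 < p.2))).map (fun p => p.1)
  let slots : List Nat :=
    ((PySem.List.enumerate proto).foldl
        (fun st p =>
          if st.1.getD p.2 0 > gene_count.getD p.2 0 then
            (st.1.insert p.2 (st.1.getD p.2 0 - 1), st.2 ++ [p.1.toNat])
          else st)
        (proto_count, ([] : List Nat))).2
  (slots.zip missing_genes).foldl (fun res q => res.set q.1 q.2) proto

-- ===== PRECONDITION & SPEC =====
-- Pre_ excludes exactly the inputs where A raises KeyError: a gene of proto absent from original_seq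
-- (gene_count[gene] is looked up for every gene of proto).
def Pre_legalize (proto : List Int) (original_seq : List Int) : Prop :=
  ∀ g ∈ proto, g ∈ original_seq
instance (proto : List Int) (original_seq : List Int) : Decidable (Pre_legalize proto original_seq) := by unfold Pre_legalize; infer_instance
def pvWitness_legalize : List Int × List Int := ([1, 2, 2], [1, 2, 3])


def Spec_legalize (proto : List Int) (original_seq : List Int) (out : List Int) : Prop := out = legalize_alt proto original_seq
instance (proto : List Int) (original_seq : List Int) (out : List Int) : Decidable (Spec_legalize proto original_seq out) := by unfold Spec_legalize; infer_instance

-- ===== CLAIM (what is proved, stated in full; the proofs are below) =====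
def Claim_equal_legalize : Prop := ∀ (proto : List Int) (original_seq : List Int), Dom_legalize proto original_seq → Pre_legalize proto original_seq → Spec_legalize proto original_seq (legalize proto original_seq)

-- ===== LEMMAS AND PROOFS =====

-- A's dict comprehension {g: xs.count(g) for g in xs}: every lookup yields the total count.
lemma getD_foldl_insert_const (c : Int → Int) :
    ∀ (l : List Int) (d : PySem.Dict Int Int) (k : Int),
    (l.foldl (fun d g => d.insert g (c g)) d).getD k 0
      = if k ∈ l then c k else d.getD k 0 := by
  intro l
  induction l with
  | nil => intro d k; simp
  | cons g l ih =>
    intro d k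
    simp only [List.foldl_cons, ih, PySem.Dict.getD_insert, List.mem_cons]
    by_cases hk : k ∈ l <;> by_cases he : k = g <;> simp [hk, he]

-- A's dict comprehension equals B's incrementally built counter.
lemma compr_eq_counter (xs : List Int) :
    xs.foldl (fun d g => d.insert g ((xs.count g : Int))) PySem.Dict.empty
      = PySem.Dict.counter xs := by
  apply PySem.Dict.ext
  have hnd : (xs.foldl (fun d g => d.insert g ((xs.count g : Int))) PySem.Dict.empty).keys.Nodup :=
    PySem.Dict.nodup_keys_foldl_insert _ _ _ PySem.Dict.nodup_keys_empty
  rw [PySem.Dict.items_eq_map_keys _ hnd 0, PySem.Dict.items_counter,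
      PySem.Dict.keys_foldl_insert, PySem.Dict.keys_empty, PySem.Set.update_nil_left]
  apply List.map_congr_left
  intro k hk
  rw [getD_foldl_insert_const]
  simp [(PySem.List.mem_dedup xs k).mp hk]

-- B's counting loop is PySem's counter.
lemma pvCounts_eq_counter (xs : List Int) : pvCounts xs = PySem.Dict.counter xs :=
  PySem.Dict.foldl_insert_getD_add_one_eq_counter xs

-- B's slot-collecting fold: the accumulator factors out.
lemma slots_acc (gc : PySem.Dict Int Int) :
    ∀ (es : List (Int × Int)) (pc : PySem.Dict Int Int) (acc : List Nat),
    (es.foldl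
        (fun st p =>
          if st.1.getD p.2 0 > gc.getD p.2 0 then
            (st.1.insert p.2 (st.1.getD p.2 0 - 1), st.2 ++ [p.1.toNat])
          else st)
        (pc, acc)).2
      = acc ++ (es.foldl
        (fun st p =>
          if st.1.getD p.2 0 > gc.getD p.2 0 then
            (st.1.insert p.2 (st.1.getD p.2 0 - 1), st.2 ++ [p.1.toNat])
          else st)
        (pc, ([] : List Nat))).2 := by
  intro es
  induction es with
  | nil => intro pc acc; simp
  | cons p es ih =>
    intro pc acc
    by_cases h : pc.getD p.2 0 > gc.getD p.2 0 <;>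
      simp only [List.foldl_cons, if_pos, h, ite_false]
    · rw [ih, ih (acc := [] ++ [p.1.toNat])]
      simp
    · exact ih pc acc

-- A's mutating loop with an exhausted missing list never changes the result list.
lemma afold_nil_miss (gc : PySem.Dict Int Int) :
    ∀ (es : List (Int × Int)) (res : List Int) (pc : PySem.Dict Int Int),
    (es.foldl
        (fun st p =>
          if st.2.1.getD p.2 0 > gc.getD p.2 0 then
            match st.2.2 with
            | [] => (st.1, st.2.1.insert p.2 (st.2.1.getD p.2 0 - 1), ([] : List Int))
            | m :: ms => (st.1.set p.1.toNat m, st.2.1.insert p.2 (st.2.1.getD p.2 0 - 1), ms)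
          else st)
        (res, pc, ([] : List Int))).1 = res := by
  intro es
  induction es with
  | nil => intro res pc; rfl
  | cons p es ih =>
    intro res pc
    by_cases h : pc.getD p.2 0 > gc.getD p.2 0 <;>
      simp only [List.foldl_cons, h, ite_true, ite_false]
    · exact ih res _
    · exact ih res pc

-- The heart of the equivalence: A's assign-as-you-go loop equals B's
-- collect-slots-then-zip-with-missing two-pass form, for any common state.
lemma loop_eq (gc : PySem.Dict Int Int) :
    ∀ (es : List (Int × Int)) (res : List Int) (pc : PySem.Dict Int Int) (miss : List Int),
    (es.foldl
        (fun st p =>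
          if st.2.1.getD p.2 0 > gc.getD p.2 0 then
            match st.2.2 with
            | [] => (st.1, st.2.1.insert p.2 (st.2.1.getD p.2 0 - 1), ([] : List Int))
            | m :: ms => (st.1.set p.1.toNat m, st.2.1.insert p.2 (st.2.1.getD p.2 0 - 1), ms)
          else st)
        (res, pc, miss)).1
      = (((es.foldl
            (fun st p =>
              if st.1.getD p.2 0 > gc.getD p.2 0 then
                (st.1.insert p.2 (st.1.getD p.2 0 - 1), st.2 ++ [p.1.toNat])
              else st)
            (pc, ([] : List Nat))).2).zip miss).foldl (fun res q => res.set q.1 q.2) res := by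
  intro es
  induction es with
  | nil => intro res pc miss; rfl
  | cons p es ih =>
    intro res pc miss
    by_cases h : pc.getD p.2 0 > gc.getD p.2 0 <;>
      simp only [List.foldl_cons, h, ite_true, ite_false]
    · rw [slots_acc]
      cases miss with
      | nil =>
        simp only [List.nil_append, List.zip_nil_right, List.foldl_nil]
        exact afold_nil_miss gc es res _
      | cons m ms =>
        simp only [List.cons_append, List.nil_append]
        exact ih _ _ ms
    · exact ih res pc miss

-- ===== VERDICT (by name: the statement is the Claim_ definition above) =====
theorem legalize_spec : Claim_equal_legalize := by
  intro proto original_seq _ _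
  unfold Spec_legalize legalize legalize_alt
  simp only [compr_eq_counter, pvCounts_eq_counter]
  exact loop_eq _ _ proto _ _
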